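-- pv_equiv track=rewrite | github.com/zahrasafdari/labs109 | labs109.py | reverse_110
-- ===== SOURCE A (Python) =====
-- RULES_110 = {  # Define a dictionary that maps tuples of binary values to new binary values according to the Rule 110 cellular automaton.
--     (1, 1, 1): 0,
--     (1, 1, 0): 1,
--     (1, 0, 1): 1,
--     (1, 0, 0): 0,
--     (0, 1, 1): 1,
--     (0, 1, 0): 1,
--     (0, 0, 1): 1,
--     (0, 0, 0): 0
-- }
--
-- def reverse_110(current):  # Define a function that takes a list of binary values as input.
--     hold_dict = {}  # Create an empty dictionary to store previous results.
--     number = len(current)  # Find the length of the input list.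
--     if tuple(current) in hold_dict:  # Check if the current list has been found before.
--         return hold_dict[tuple(current)]  # If so, return the previously found result.
--
--     def generate_exis():  # Define a generator function that yields all possible binary values of length 'number'.
--         for i in range(2**number):
--             yield tuple(int(digit) for digit in format(i, f'0{number}b'))
--
--     exis_rules = []  # Create an empty list to store the new binary values for all possible combinations of binary values of length 'number'.
--     for p in generate_exis():
--         exis_rules.append(tuple(
--             RULES_110[(p[(j-1) % number], p[j], p[(j+1) % number])] for j in range(number)))
--
--     for key, value in zip(generate_exis(), exis_rules):  # Loop over all possible binary values of length 'number' and their corresponding new binary values.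
--         if len(key) == number and all(value[i] == current[i] for i in range(number)):  # If the new binary values match the input list, return the corresponding binary value.
--             hold_dict[tuple(current)] = list(key)
--             return list(key)
--
--     return None  # If no matching binary value is found, return None.
-- ===== SOURCE B (Python) =====
-- def reverse_110(current):
--     """Backtracking search with constraint pruning instead of exhaustive
--     generate-and-test: predecessor bits are chosen left to right (0 before 1, so
--     the first solution found is the lexicographically smallest, i.e. the first in
--     numeric enumeration order); as soon as the three cells of a cyclic
--     neighbourhood are fixed, its Rule-110 constraint is checked and the branch is
--     pruned on failure.  The two wrap-around constraints are checked at the end."""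
--     n = len(current)
--     if n == 0:
--         return None
--
--     def f(a, b, c):  # Rule 110 applied to the neighbourhood (a, b, c)
--         if a == 1 and b == 1 and c == 1:
--             return 0
--         return 1 if b == 1 or c == 1 else 0
--
--     def search(p):
--         j = len(p)
--         if j >= 3 and f(p[j - 3], p[j - 2], p[j - 1]) != current[j - 2]:
--             return None
--         if j == n:
--             if (f(p[n - 1], p[0], p[1 % n]) == current[0]
--                     and f(p[(n - 2) % n], p[n - 1], p[0]) == current[n - 1]):
--                 return p[:]
--             return None
--         for x in (0, 1):
--             p.append(x)
--             r = search(p)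
--             p.pop()
--             if r is not None:
--                 return r
--         return None
--
--     return search([])
-- ===== Notes on version B (the rewrite author's own statement) =====
-- stated objective: faster
-- what changed: Replaces exhaustive generate-and-test over all 2^n candidate predecessors (materialising every candidate's full Rule-110 image before scanning) with a left-to-right backtracking search that checks each cyclic-neighbourhood constraint as soon as its three cells are fixed and prunes failing branches, returning the first (lexicographically smallest) solution found.
import Mathlib
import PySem

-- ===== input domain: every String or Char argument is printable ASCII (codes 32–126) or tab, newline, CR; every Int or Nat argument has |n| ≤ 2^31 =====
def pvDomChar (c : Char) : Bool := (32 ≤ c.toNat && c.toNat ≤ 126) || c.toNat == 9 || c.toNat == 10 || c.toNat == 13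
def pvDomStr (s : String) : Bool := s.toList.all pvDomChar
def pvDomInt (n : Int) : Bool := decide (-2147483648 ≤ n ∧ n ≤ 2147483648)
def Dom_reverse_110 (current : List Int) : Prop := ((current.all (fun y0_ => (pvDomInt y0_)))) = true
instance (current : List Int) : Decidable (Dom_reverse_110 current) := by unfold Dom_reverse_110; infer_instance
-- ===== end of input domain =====

-- B replaces A's exhaustive generate-and-test over all 2^n candidate predecessors by a
-- left-to-right backtracking search that prunes a branch as soon as one cyclic Rule-110
-- neighbourhood constraint fails (objective: faster; first solution found = A's answer).


-- ===== PORT A =====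
-- the module constant RULES_110, as a Python dict
def pvRules110 : PySem.Dict (Int × Int × Int) Int :=
  PySem.Dict.ofList [((1, 1, 1), 0), ((1, 1, 0), 1), ((1, 0, 1), 1), ((1, 0, 0), 0),
                     ((0, 1, 1), 1), ((0, 1, 0), 1), ((0, 0, 1), 1), ((0, 0, 0), 0)]

-- hand port of format(i, 'b') for i ≥ 0: most-significant-first binary digits, '0' for 0 (exact there)
def pvBitsAux : Nat → List Int → List Int
  | 0, acc => acc
  | (i + 1), acc => pvBitsAux ((i + 1) / 2) ((((i + 1) % 2 : Nat) : Int) :: acc)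
decreasing_by omega

def pvFormatBin (i : Nat) : List Int := if i = 0 then [0] else pvBitsAux i []

-- hand port of tuple(int(digit) for digit in format(i, f'0{number}b')): the digits, left-padded with 0s
def pvToBin (width i : Nat) : List Int :=
  List.replicate (width - (pvFormatBin i).length) 0 ++ pvFormatBin i

def reverse_110 (current : List Int) : Option (List Int) :=
  let number := current.length
  -- hold_dict starts empty, so A's memo check 'tuple(current) in hold_dict' is always false
  -- generate_exis: for i in range(2**number) (i ≥ 0, so Nat range is exact)
  let exis := (List.range (2 ^ number)).map (pvToBin number)
  let exisRules := exis.map (fun p =>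
    (List.range number).map (fun (j : Nat) =>
      -- RULES_110[...] : the key is always present (p entries are bits), so getD never defaults
      (pvRules110.get? (PySem.List.pyGetD p (PySem.Int.mod ((j : Int) - 1) number) 0,
                        PySem.List.pyGetD p (j : Int) 0,
                        PySem.List.pyGetD p (PySem.Int.mod ((j : Int) + 1) number) 0)).getD 0))
  (((exis.zip exisRules).find? (fun kv =>
      kv.1.length == number &&
      (List.range number).all (fun (i : Nat) =>
        PySem.List.pyGetD kv.2 (i : Int) 0 == PySem.List.pyGetD current (i : Int) 0))).map (fun kv => kv.1))

-- ===== PORT B =====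
-- Source B's helper f: Rule 110 on the neighbourhood (a, b, c)
def pvF110 (a b c : Int) : Int :=
  if a = 1 ∧ b = 1 ∧ c = 1 then 0 else if b = 1 ∨ c = 1 then 1 else 0

-- the pruning test 'j >= 3 and f(p[j-3], p[j-2], p[j-1]) != current[j-2]' (indices in range)
def pvPrune (current p : List Int) : Bool :=
  decide (3 ≤ p.length) &&
    !(pvF110 (p.getD (p.length - 3) 0) (p.getD (p.length - 2) 0) (p.getD (p.length - 1) 0)
        == current.getD (p.length - 2) 0)

-- the wrap-around test at j == n (indices in range; Nat '-'/'%' agree with Python's here since n ≥ 1)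
def pvFinal (current p : List Int) (n : Nat) : Bool :=
  (pvF110 (p.getD (n - 1) 0) (p.getD 0 0) (p.getD (1 % n) 0) == current.getD 0 0) &&
  (pvF110 (p.getD ((n - 2) % n) 0) (p.getD (n - 1) 0) (p.getD 0 0) == current.getD (n - 1) 0)

-- Source B's search: fuel = n - len(p) many bits still to choose (so fuel = 0 ↔ j == n)
def pvSearch (current : List Int) (n : Nat) : Nat → List Int → Option (List Int)
  | 0, p =>
    if pvPrune current p then none
    else if pvFinal current p n then some p else none
  | (fuel + 1), p =>
    if pvPrune current p then none
    else
      match pvSearch current n fuel (p ++ [0]) with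
      | some r => some r
      | none => pvSearch current n fuel (p ++ [1])

def reverse_110_alt (current : List Int) : Option (List Int) :=
  if current.length = 0 then none
  else pvSearch current current.length current.length []

-- ===== PRECONDITION & SPEC =====
def Spec_reverse_110 (current : List Int) (out : Option (List Int)) : Prop := out = reverse_110_alt current
instance (current : List Int) (out : Option (List Int)) : Decidable (Spec_reverse_110 current out) := by unfold Spec_reverse_110; infer_instance

-- ===== CLAIM (what is proved, stated in full; the proofs are below) =====
def Claim_equal_reverse_110 : Prop := ∀ (current : List Int), Dom_reverse_110 current → Spec_reverse_110 current (reverse_110 current)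

-- ===== LEMMAS AND PROOFS =====

-- the length-k bit lists in lexicographic (= numeric) order
def allBits : Nat → List (List Int)
  | 0 => [[]]
  | (k + 1) => (allBits k).map (fun t => (0 : Int) :: t) ++ (allBits k).map (fun t => (1 : Int) :: t)

-- the k-digit big-endian binary representation of i (for i < 2^k)
def bitsBE : Nat → Nat → List Int
  | 0, _ => []
  | (k + 1), i => ((i / 2 ^ k : Nat) : Int) :: bitsBE k (i % 2 ^ k)

-- one interior constraint of the predecessor problem
def pcheck (c p : List Int) (i : Nat) : Bool :=
  pvF110 (p.getD (i - 1) 0) (p.getD i 0) (p.getD (i + 1) 0) == c.getD i 0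

-- the full solution predicate: wrap-around constraints plus all interior constraints
def Sol (c q : List Int) : Bool :=
  pvFinal c q c.length && (List.range (c.length - 2)).all (fun k => pcheck c q (k + 1))

-- one cyclic constraint, as A evaluates it
def cyc (c q : List Int) (n i : Nat) : Bool :=
  pvF110 (q.getD ((i + (n - 1)) % n) 0) (q.getD i 0) (q.getD ((i + 1) % n) 0) == c.getD i 0

theorem find?_zip_map {α β : Type} (xs : List α) (f : α → β) (P : α × β → Bool) :
    ((xs.zip (xs.map f)).find? P).map Prod.fst = xs.find? (fun x => P (x, f x)) := by
  induction xs with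
  | nil => simp
  | cons x xs ih =>
    simp only [List.map_cons, List.zip_cons_cons, List.find?_cons]
    by_cases h : P (x, f x) <;> simp [h, ih]

theorem find?_congr_mem {α : Type} (l : List α) (P Q : α → Bool) (h : ∀ x ∈ l, P x = Q x) :
    l.find? P = l.find? Q := by
  induction l with
  | nil => rfl
  | cons x xs ih =>
    simp only [List.find?_cons, h x (List.mem_cons_self ..)]
    split <;> [rfl; exact ih fun y hy => h y (List.mem_cons_of_mem _ hy)]

theorem all_congr_mem {α : Type} (l : List α) (P Q : α → Bool) (h : ∀ x ∈ l, P x = Q x) :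
    l.all P = l.all Q := by
  induction l with
  | nil => rfl
  | cons x xs ih =>
    simp only [List.all_cons, h x (List.mem_cons_self ..)]
    rw [ih fun y hy => h y (List.mem_cons_of_mem _ hy)]

theorem length_bitsBE (k i : Nat) : (bitsBE k i).length = k := by
  induction k generalizing i with
  | zero => rfl
  | succ k ih => simp [bitsBE, ih]

theorem bitsBE_split (n : Nat) : ∀ i, i < 2 ^ (n + 1) →
    bitsBE (n + 1) i = bitsBE n (i / 2) ++ [((i % 2 : Nat) : Int)] := by
  induction n with
  | zero =>
    intro i hi
    interval_cases i <;> simp [bitsBE]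
  | succ n ih =>
    intro i hi
    have h2 : 2 ^ (n + 1 + 1) = 2 * 2 ^ (n + 1) := by ring
    have h2' : 2 ^ (n + 1) = 2 * 2 ^ n := by ring
    have hin : i % 2 ^ (n + 1) < 2 ^ (n + 1) := Nat.mod_lt _ (by positivity)
    show ((i / 2 ^ (n + 1) : Nat) : Int) :: bitsBE (n + 1) (i % 2 ^ (n + 1)) = _
    rw [ih _ hin]
    show _ = ((i / 2 / 2 ^ n : Nat) : Int) :: (bitsBE n (i / 2 % 2 ^ n) ++ _)
    have e1 : i / 2 / 2 ^ n = i / 2 ^ (n + 1) := by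
      rw [Nat.div_div_eq_div_mul, h2', Nat.mul_comm]
    have e2 : i % 2 ^ (n + 1) / 2 = i / 2 % 2 ^ n := by
      rw [h2', Nat.mod_mul_right_div_self]
    have e3 : i % 2 ^ (n + 1) % 2 = i % 2 := by
      exact Nat.mod_mod_of_dvd i (Dvd.intro (2 ^ n) (by ring))
    rw [e1, e2, e3]

theorem pvBitsAux_eq (k : Nat) : ∀ i, 2 ^ k ≤ i → i < 2 ^ (k + 1) → ∀ acc,
    pvBitsAux i acc = bitsBE (k + 1) i ++ acc := by
  induction k with
  | zero =>
    intro i h1 h2 acc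
    have : i = 1 := by omega
    subst this
    simp [pvBitsAux, bitsBE]
  | succ k ih =>
    intro i h1 h2 acc
    have h2k : 2 ^ (k + 1) = 2 * 2 ^ k := by ring
    have h2k2 : 2 ^ (k + 1 + 1) = 2 * 2 ^ (k + 1) := by ring
    have hpos : 1 ≤ 2 ^ k := Nat.one_le_two_pow
    obtain ⟨m, rfl⟩ : ∃ m, i = m + 1 := ⟨i - 1, by omega⟩
    rw [pvBitsAux]
    rw [ih ((m + 1) / 2) (by omega) (by omega) _]
    rw [bitsBE_split (k + 1) (m + 1) h2]
    simp

theorem length_pvBitsAux (k : Nat) : ∀ i, i < 2 ^ k → ∀ acc : List Int,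
    (pvBitsAux i acc).length ≤ k + acc.length := by
  induction k with
  | zero =>
    intro i hi acc
    have : i = 0 := by omega
    subst this
    simp [pvBitsAux]
  | succ k ih =>
    intro i hi acc
    match i with
    | 0 => simp [pvBitsAux]
    | m + 1 =>
      rw [pvBitsAux]
      have h2k : 2 ^ (k + 1) = 2 * 2 ^ k := by ring
      have := ih ((m + 1) / 2) (by omega) ((((m + 1) % 2 : Nat) : Int) :: acc)
      simp only [List.length_cons] at this
      omega

theorem length_pvFormatBin {k i : Nat} (hk : 1 ≤ k) (hi : i < 2 ^ k) :
    (pvFormatBin i).length ≤ k := by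
  unfold pvFormatBin
  split
  · simpa using hk
  · simpa using length_pvBitsAux k i hi []

theorem pvToBin_eq_bitsBE (n : Nat) (hn : 1 ≤ n) : ∀ i, i < 2 ^ n → pvToBin n i = bitsBE n i := by
  induction n, hn using Nat.le_induction with
  | base =>
    intro i hi
    interval_cases i <;> norm_num [pvToBin, pvFormatBin, pvBitsAux, bitsBE]
  | succ n hn ih =>
    intro i hi
    by_cases h : i < 2 ^ n
    · have hL : (pvFormatBin i).length ≤ n := length_pvFormatBin hn h
      have : bitsBE (n + 1) i = (0 : Int) :: bitsBE n i := by
        show ((i / 2 ^ n : Nat) : Int) :: bitsBE n (i % 2 ^ n) = _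
        rw [Nat.div_eq_of_lt h, Nat.mod_eq_of_lt h]
        simp
      rw [this, ← ih i h]
      unfold pvToBin
      rw [show n + 1 - (pvFormatBin i).length = (n - (pvFormatBin i).length) + 1 by omega,
        List.replicate_succ]
      simp
    · have hfz : i ≠ 0 := by
        have : 1 ≤ 2 ^ n := Nat.one_le_two_pow
        omega
      have hF : pvFormatBin i = bitsBE (n + 1) i := by
        unfold pvFormatBin
        rw [if_neg hfz]
        simpa using pvBitsAux_eq n i (by omega) hi []
      unfold pvToBin
      rw [hF, length_bitsBE]
      simp

theorem range_map_bitsBE (n : Nat) : (List.range (2 ^ n)).map (bitsBE n) = allBits n := by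
  induction n with
  | zero => simp [allBits, bitsBE]
  | succ n ih =>
    have h2 : 2 ^ (n + 1) = 2 ^ n + 2 ^ n := by ring
    rw [h2, List.range_add, List.map_append, List.map_map]
    have hfst : (List.range (2 ^ n)).map (bitsBE (n + 1)) =
        ((List.range (2 ^ n)).map (bitsBE n)).map (fun t => (0 : Int) :: t) := by
      rw [List.map_map]
      refine List.map_congr_left fun i hi => ?_
      rw [List.mem_range] at hi
      show ((i / 2 ^ n : Nat) : Int) :: bitsBE n (i % 2 ^ n) = _
      rw [Nat.div_eq_of_lt hi, Nat.mod_eq_of_lt hi]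
      simp
    have hsnd : (List.range (2 ^ n)).map (bitsBE (n + 1) ∘ fun x => 2 ^ n + x) =
        ((List.range (2 ^ n)).map (bitsBE n)).map (fun t => (1 : Int) :: t) := by
      rw [List.map_map]
      refine List.map_congr_left fun i hi => ?_
      rw [List.mem_range] at hi
      show ((((2 ^ n + i) / 2 ^ n : Nat)) : Int) :: bitsBE n ((2 ^ n + i) % 2 ^ n) = _
      rw [Nat.add_comm (2 ^ n) i, Nat.add_div_right _ (by positivity), Nat.add_mod_right,
        Nat.div_eq_of_lt hi, Nat.mod_eq_of_lt hi]
      simp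
    rw [hfst, hsnd, ih]
    rfl

theorem mem_allBits_length {k : Nat} {q : List Int} (h : q ∈ allBits k) : q.length = k := by
  induction k generalizing q with
  | zero => simp [allBits] at h; simp [h]
  | succ k ih =>
    simp only [allBits, List.mem_append, List.mem_map] at h
    rcases h with ⟨t, ht, rfl⟩ | ⟨t, ht, rfl⟩ <;> simp [ih ht]

theorem mem_allBits_bit {k : Nat} {q : List Int} (h : q ∈ allBits k) :
    ∀ x ∈ q, x = 0 ∨ x = 1 := by
  induction k generalizing q with
  | zero => simp [allBits] at h; simp [h]
  | succ k ih =>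
    simp only [allBits, List.mem_append, List.mem_map] at h
    rcases h with ⟨t, ht, rfl⟩ | ⟨t, ht, rfl⟩ <;>
      (intro x hx; rcases List.mem_cons.mp hx with rfl | hx)
    · left; rfl
    · exact ih ht x hx
    · right; rfl
    · exact ih ht x hx

theorem rules_eq_pvF110 {a b c : Int} (ha : a = 0 ∨ a = 1) (hb : b = 0 ∨ b = 1)
    (hc : c = 0 ∨ c = 1) : ((pvRules110.get? (a, b, c)).getD 0) = pvF110 a b c := by
  rcases ha with rfl | rfl <;> rcases hb with rfl | rfl <;> rcases hc with rfl | rfl <;> decide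

theorem idx_left_zero {n : Nat} (hn : 1 ≤ n) : (0 + (n - 1)) % n = n - 1 := by
  rw [Nat.zero_add]; exact Nat.mod_eq_of_lt (by omega)

theorem idx_left_last {n : Nat} (hn : 1 ≤ n) : (n - 1 + (n - 1)) % n = (n - 2) % n := by
  rcases Nat.lt_or_ge n 2 with h | h
  · have : n = 1 := by omega
    subst this; rfl
  · rw [show n - 1 + (n - 1) = (n - 2) + n by omega, Nat.add_mod_right]

theorem idx_right_last {n : Nat} (hn : 1 ≤ n) : (n - 1 + 1) % n = 0 := by
  rw [show n - 1 + 1 = n by omega, Nat.mod_self]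

theorem idx_left_mid {n i : Nat} (h1 : 1 ≤ i) (h2 : i + 2 ≤ n) : (i + (n - 1)) % n = i - 1 := by
  rw [show i + (n - 1) = (i - 1) + n by omega, Nat.add_mod_right, Nat.mod_eq_of_lt (by omega)]

theorem idx_right_mid {n i : Nat} (h2 : i + 2 ≤ n) : (i + 1) % n = i + 1 :=
  Nat.mod_eq_of_lt (by omega)

-- A's cyclic constraints, taken over all indices, are the wrap-around checks plus the interior checks
theorem cyc_all_eq_Sol (c q : List Int) (hn : 1 ≤ c.length) :
    (List.range c.length).all (fun i => cyc c q c.length i) = Sol c q := by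
  set n := c.length with hnd
  rw [Bool.eq_iff_iff]
  simp only [List.all_eq_true, List.mem_range, Sol, pvFinal, Bool.and_eq_true, cyc, pcheck, ← hnd]
  constructor
  · intro h
    refine ⟨⟨?_, ?_⟩, fun k hk => ?_⟩
    · have := h 0 (by omega)
      rwa [idx_left_zero hn, Nat.zero_add] at this
    · have := h (n - 1) (by omega)
      rwa [idx_left_last hn, idx_right_last hn] at this
    · have := h (k + 1) (by omega)
      rwa [idx_left_mid (by omega) (by omega), idx_right_mid (by omega), Nat.add_sub_cancel] at this
  · rintro ⟨⟨h0, hl⟩, hmid⟩ i hi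
    by_cases hz : i = 0
    · subst hz
      rwa [idx_left_zero hn, Nat.zero_add]
    · by_cases hL : i = n - 1
      · subst hL
        rwa [idx_left_last hn, idx_right_last hn]
      · have h1 : 1 ≤ i := by omega
        have h2 : i + 2 ≤ n := by omega
        rw [idx_left_mid h1 h2, idx_right_mid h2]
        have := hmid (i - 1) (by omega)
        rwa [Nat.sub_add_cancel h1] at this

theorem intmod_sub_one {n i : Nat} (hn : 1 ≤ n) :
    PySem.Int.mod ((i : Int) - 1) (n : Int) = (((i + (n - 1)) % n : Nat) : Int) := by
  rw [PySem.Int.mod_eq_emod_of_pos (by exact_mod_cast hn)]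
  rw [show ((i : Int) - 1) = ((i + (n - 1) : Nat) : Int) - (n : Int) by push_cast [hn]; omega]
  rw [Int.sub_emod_right]
  exact (Int.natCast_mod _ _).symm

theorem intmod_add_one {n i : Nat} (hn : 1 ≤ n) :
    PySem.Int.mod ((i : Int) + 1) (n : Int) = (((i + 1) % n : Nat) : Int) := by
  rw [PySem.Int.mod_eq_emod_of_pos (by exact_mod_cast hn)]
  rw [show ((i : Int) + 1) = ((i + 1 : Nat) : Int) by push_cast; ring]
  exact (Int.natCast_mod _ _).symm

theorem getD_bit {q : List Int} {k n : Nat} (hq : q.length = n) (hk : k < n)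
    (hbit : ∀ x ∈ q, x = 0 ∨ x = 1) : q.getD k 0 = 0 ∨ q.getD k 0 = 1 := by
  rw [List.getD_eq_getElem q 0 (by omega)]
  exact hbit _ (List.getElem_mem _)

theorem reverse_110_eq_find (c : List Int) (hn : 1 ≤ c.length) :
    reverse_110 c = (allBits c.length).find? (Sol c) := by
  unfold reverse_110
  rw [find?_zip_map]
  have hmap : (List.range (2 ^ c.length)).map (pvToBin c.length) = allBits c.length := by
    rw [← range_map_bitsBE c.length]
    exact List.map_congr_left fun i hi => pvToBin_eq_bitsBE c.length hn i (List.mem_range.mp hi)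
  rw [hmap]
  refine find?_congr_mem _ _ _ fun q hq => ?_
  have hlen : q.length = c.length := mem_allBits_length hq
  have hbit := mem_allBits_bit hq
  rw [← cyc_all_eq_Sol c q hn]
  simp only [hlen, beq_self_eq_true, Bool.true_and]
  refine all_congr_mem _ _ _ fun i hi => ?_
  rw [List.mem_range] at hi
  have hmod1 : (i + (c.length - 1)) % c.length < c.length := Nat.mod_lt _ (by omega)
  have hmod2 : (i + 1) % c.length < c.length := Nat.mod_lt _ (by omega)
  rw [PySem.List.pyGetD_natCast, PySem.List.pyGetD_natCast]
  rw [PySem.List.getD_map_range _ _ _ _ hi]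
  rw [intmod_sub_one hn, intmod_add_one hn,
    PySem.List.pyGetD_natCast, PySem.List.pyGetD_natCast, PySem.List.pyGetD_natCast,
    rules_eq_pvF110 (getD_bit hlen hmod1 hbit) (getD_bit hlen hi hbit) (getD_bit hlen hmod2 hbit)]
  rfl

theorem pcheck_append (c p t : List Int) (i : Nat) (h : i + 1 < p.length) :
    pcheck c (p ++ t) i = pcheck c p i := by
  unfold pcheck
  rw [List.getD_append _ _ _ _ (by omega), List.getD_append _ _ _ _ (by omega),
    List.getD_append _ _ _ _ (by omega)]

theorem pvPrune_eq (c p : List Int) :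
    pvPrune c p = (decide (3 ≤ p.length) && ! pcheck c p (p.length - 2)) := by
  unfold pvPrune pcheck
  by_cases h : 3 ≤ p.length
  · rw [show p.length - 2 - 1 = p.length - 3 by omega, show p.length - 2 + 1 = p.length - 1 by omega]
  · simp [h]

theorem Sol_false_of_pcheck_false {c q : List Int} {i : Nat} (h1 : 1 ≤ i)
    (h2 : i + 2 ≤ c.length) (hf : pcheck c q i = false) : Sol c q = false := by
  unfold Sol
  rw [Bool.and_eq_false_iff]
  right
  rw [List.all_eq_false]
  exact ⟨i - 1, by rw [List.mem_range]; omega, by rw [Nat.sub_add_cancel h1, hf]; simp⟩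

theorem pvSearch_eq_find (c : List Int) (hn : 1 ≤ c.length) : ∀ (fuel : Nat) (p : List Int),
    p.length + fuel = c.length →
    (∀ i, 1 ≤ i → i + 2 < p.length → pcheck c p i = true) →
    pvSearch c c.length fuel p = ((allBits fuel).map (fun t => p ++ t)).find? (Sol c) := by
  intro fuel
  induction fuel with
  | zero =>
    intro p hlen hpre
    simp only [Nat.add_zero] at hlen
    have hone : ((allBits 0).map (fun t => p ++ t)) = [p] := by simp [allBits]
    rw [hone]
    cases hpr : pvPrune c p with
    | true =>
      -- a failing newest interior constraint: p itself is not a solution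
      have hpr' := hpr
      rw [pvPrune_eq] at hpr'
      have h3 : 3 ≤ p.length := by by_contra h; simp [h] at hpr'
      have hf : pcheck c p (p.length - 2) = false := by
        rcases Bool.and_eq_true_iff.mp hpr' with ⟨_, hb⟩
        simpa using hb
      have hsol : Sol c p = false :=
        Sol_false_of_pcheck_false (i := p.length - 2) (by omega) (by omega) hf
      simp [pvSearch, hpr, List.find?, hsol]
    | false =>
      have hall : Sol c p = pvFinal c p c.length := by
        unfold Sol
        have : (List.range (c.length - 2)).all (fun k => pcheck c p (k + 1)) = true := by
          rw [List.all_eq_true]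
          intro k hk
          rw [List.mem_range] at hk
          rcases Nat.lt_or_ge (k + 1 + 2) c.length with h | h
          · exact hpre (k + 1) (by omega) (by omega)
          · -- k + 1 = length - 2: this is exactly the pruning check, which passed
            have hk2 : k + 1 = c.length - 2 := by omega
            have hpr' := hpr
            rw [pvPrune_eq] at hpr'
            rcases Bool.and_eq_false_iff.mp hpr' with h' | h'
            · simp at h'; omega
            · rw [hk2, ← hlen]
              simpa using h'
        rw [this, Bool.and_true]
      cases hF : pvFinal c p c.length <;>
        simp [pvSearch, hpr, hF, List.find?, hall]
  | succ fuel ih =>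
    intro p hlen hpre
    have hblock : ((allBits (fuel + 1)).map (fun t => p ++ t)) =
        ((allBits fuel).map (fun t => (p ++ [0]) ++ t)) ++
        ((allBits fuel).map (fun t => (p ++ [1]) ++ t)) := by
      show ((allBits fuel).map (fun t => (0 : Int) :: t) ++
            (allBits fuel).map (fun t => (1 : Int) :: t)).map (fun t => p ++ t) = _
      rw [List.map_append, List.map_map, List.map_map]
      congr 1 <;> exact List.map_congr_left fun t _ => by simp
    cases hpr : pvPrune c p with
    | true =>
      -- prune: no extension of p can be a solution
      have hpr' := hpr
      rw [pvPrune_eq] at hpr'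
      have h3 : 3 ≤ p.length := by by_contra h; simp [h] at hpr'
      have hf : pcheck c p (p.length - 2) = false := by
        rcases Bool.and_eq_true_iff.mp hpr' with ⟨_, hb⟩
        simpa using hb
      have hnone : ((allBits (fuel + 1)).map (fun t => p ++ t)).find? (Sol c) = none := by
        rw [List.find?_eq_none]
        intro q hq
        rw [List.mem_map] at hq
        obtain ⟨t, _, rfl⟩ := hq
        have hft : pcheck c (p ++ t) (p.length - 2) = false := by
          rw [pcheck_append c p t _ (by omega)]; exact hf
        have := Sol_false_of_pcheck_false (i := p.length - 2) (by omega) (by omega) hft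
        simp [this]
      rw [hnone]
      simp [pvSearch, hpr]
    | false =>
      have hpre' : ∀ x : Int, ∀ i, 1 ≤ i → i + 2 < (p ++ [x]).length → pcheck c (p ++ [x]) i = true := by
        intro x i h1 h2
        simp only [List.length_append, List.length_cons, List.length_nil] at h2
        rw [pcheck_append c p [x] i (by omega)]
        rcases Nat.lt_or_ge (i + 2) p.length with h | h
        · exact hpre i h1 h
        · -- i = p.length - 2: the pruning check, which passed
          have h3 : 3 ≤ p.length := by omega
          have hi2 : i = p.length - 2 := by omega
          have hpr' := hpr
          rw [pvPrune_eq] at hpr'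
          rcases Bool.and_eq_false_iff.mp hpr' with h' | h'
          · simp at h'; omega
          · rw [hi2]
            simpa using h'
      have ih0 := ih (p ++ [0]) (by simp; omega) (hpre' 0)
      have ih1 := ih (p ++ [1]) (by simp; omega) (hpre' 1)
      rw [hblock, List.find?_append, ← ih0, ← ih1]
      show pvSearch c c.length (fuel + 1) p = _
      simp only [pvSearch, hpr, Bool.false_eq_true, if_false]
      cases h0 : pvSearch c c.length fuel (p ++ [0]) <;> simp

theorem reverse_110_alt_eq_find (c : List Int) (hn : 1 ≤ c.length) :
    reverse_110_alt c = (allBits c.length).find? (Sol c) := by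
  unfold reverse_110_alt
  rw [if_neg (by omega)]
  rw [pvSearch_eq_find c hn c.length [] (by simp) (by intro i _ h2; simp at h2)]
  simp

-- ===== VERDICT (by name: the statement is the Claim_ definition above) =====
theorem reverse_110_spec : Claim_equal_reverse_110 := by
  intro c _
  unfold Spec_reverse_110
  by_cases hn : 1 ≤ c.length
  · rw [reverse_110_eq_find c hn, reverse_110_alt_eq_find c hn]
  · have : c = [] := List.eq_nil_of_length_eq_zero (by omega)
    subst this
    decide
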